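-- pv_equiv track=rewrite | github.com/fh-igd-iet/FhSparseGen | FhSparseGen.py | deduplicated_sizeof
-- ===== SOURCE A (Python) =====
-- def deduplicated_sizeof(member_list):
--     """
--     Converts a list of identifiers with duplicates such as ['double', 'int', 'double']
--     to an expression such as '(2 * sizeof(double) + sizeof(int))'.
--     """
--     from collections import Counter
--
--     member_list = list(member_list)
--     if not member_list:
--         return '0'
--
--     member_counts = Counter(member_list)
--     result = ' + '.join(
--         ('' if member_counts[key] == 1 else '{} * '.format(member_counts[key])
--         ) + 'sizeof({})'.format(key) for key in sorted(member_counts)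
--     )
--     result = '({})'.format(result) if len(member_counts) > 1 else result
--     return result
-- ===== SOURCE B (Python) =====
-- def deduplicated_sizeof(member_list):
--     """
--     Converts a list of identifiers with duplicates such as ['double', 'int', 'double']
--     to an expression such as '(2 * sizeof(double) + sizeof(int))'.
--     """
--     members = list(member_list)
--     if not members:
--         return '0'
--     pairs = []
--     while members:
--         k = min(members)
--         pairs.append((k, members.count(k)))
--         members = [x for x in members if x != k]
--     terms = [('{} * '.format(n) if n > 1 else '') + 'sizeof({})'.format(k)
--              for k, n in pairs]
--     result = ' + '.join(terms)
--     return '({})'.format(result) if len(terms) > 1 else result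
-- ===== Notes on version B (the rewrite author's own statement) =====
-- stated objective: alternative
-- what changed: Replaces the Counter hash-count plus key re-sort with a selection loop that never sorts and keeps no count table: repeatedly extract the minimum remaining key with min(), count and remove all its occurrences, one term per round; this trades speed on large duplicate-free inputs (O(n*k)) for a sortless single-structure traversal.
import Mathlib
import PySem

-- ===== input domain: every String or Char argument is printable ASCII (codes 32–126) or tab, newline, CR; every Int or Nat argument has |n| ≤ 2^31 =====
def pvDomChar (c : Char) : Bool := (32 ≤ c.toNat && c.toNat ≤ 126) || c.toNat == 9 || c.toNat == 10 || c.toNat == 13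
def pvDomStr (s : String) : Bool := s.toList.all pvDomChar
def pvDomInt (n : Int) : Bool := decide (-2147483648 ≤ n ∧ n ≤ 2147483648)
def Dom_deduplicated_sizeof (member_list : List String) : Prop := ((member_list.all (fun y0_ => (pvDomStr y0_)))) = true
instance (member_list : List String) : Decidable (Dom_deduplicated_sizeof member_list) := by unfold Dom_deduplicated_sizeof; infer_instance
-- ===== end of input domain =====

-- B is an alternative implementation: a selection loop that never sorts and keeps
-- no count table — repeatedly extract the minimum remaining key with min(),
-- count and remove all its occurrences, one term per round (O(n*k), slower than
-- A on inputs with many distinct keys; no speed is claimed).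

-- ===== PORT A =====
def deduplicated_sizeof (member_list : List String) : String :=
  if member_list = [] then "0"
  else
    let member_counts := PySem.Dict.counter member_list
    let result := PySem.Str.join " + "
      ((PySem.List.sorted member_counts.keys (fun k => k) false).map
        (fun key =>
          (if member_counts.getD key 0 = 1 then ""
           else PySem.Int.toStr (member_counts.getD key 0) ++ " * ")
          ++ ("sizeof(" ++ key ++ ")")))
    if member_counts.keys.length > 1 then "(" ++ result ++ ")" else result

-- ===== PORT B =====
-- the while loop of Source B: k = min(members); record (k, members.count(k));
-- members = [x for x in members if x != k]
def pvSelect (members : List String) : List (String × Int) :=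
  match h : PySem.List.min? members (fun x => x) with
  | none => []
  | some k =>
      (k, (members.count k : Int)) :: pvSelect (members.filter (fun x => x ≠ k))
termination_by members.length
decreasing_by
  have hk : k ∈ members := PySem.List.min?_mem h
  simp only [List.length_unattach]
  refine lt_of_lt_of_eq
    (List.length_filter_lt_length_iff_exists.mpr ⟨⟨k, hk⟩, List.mem_attach _ _, ?_⟩)
    List.length_attach
  simp

def deduplicated_sizeof_alt (member_list : List String) : String :=
  if member_list = [] then "0"
  else
    let pairs := pvSelect member_list
    let terms := pairs.map
      (fun p =>
        (if p.2 > 1 then PySem.Int.toStr p.2 ++ " * " else "")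
        ++ ("sizeof(" ++ p.1 ++ ")"))
    let result := PySem.Str.join " + " terms
    if terms.length > 1 then "(" ++ result ++ ")" else result

-- ===== PRECONDITION & SPEC =====
def Spec_deduplicated_sizeof (member_list : List String) (out : String) : Prop := out = deduplicated_sizeof_alt member_list
instance (member_list : List String) (out : String) : Decidable (Spec_deduplicated_sizeof member_list out) := by unfold Spec_deduplicated_sizeof; infer_instance

-- ===== CLAIM (what is proved, stated in full; the proofs are below) =====
def Claim_equal_deduplicated_sizeof : Prop := ∀ (member_list : List String), Dom_deduplicated_sizeof member_list → Spec_deduplicated_sizeof member_list (deduplicated_sizeof member_list)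

-- ===== LEMMAS AND PROOFS =====

-- the selection loop visits exactly the distinct keys of xs in increasing order,
-- each with its count in the ORIGINAL list
theorem pvSelect_eq (xs : List String) :
    pvSelect xs
      = (PySem.List.sorted (PySem.Set.ofList xs) (fun k => k) false).map
          (fun k => (k, (xs.count k : Int))) := by
  induction hn : xs.length using Nat.strong_induction_on generalizing xs with
  | _ n ih =>
  unfold pvSelect
  cases hmin : PySem.List.min? xs (fun x => x) with
  | none =>
    have hx : xs = [] := (PySem.List.min?_eq_none_iff xs (fun x => x)).mp hmin
    subst hx; simp [PySem.Set.ofList, PySem.List.sorted]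
  | some m =>
    show (m, (xs.count m : Int)) :: pvSelect (xs.filter (fun x => x ≠ m))
        = List.map (fun k => (k, (xs.count k : Int)))
            (PySem.List.sorted (PySem.Set.ofList xs) (fun k => k) false)
    have hm : m ∈ xs := PySem.List.min?_mem hmin
    have hmin' : ∀ y ∈ xs, m ≤ y := by
      intro y hy; exact PySem.List.min?_isMin hmin y hy
    set ys := xs.filter (fun x => x ≠ m) with hys
    have hlen : ys.length < xs.length :=
      List.length_filter_lt_length_iff_exists.mpr ⟨m, hm, by simp⟩
    have hrec : pvSelect ys
        = (PySem.List.sorted (PySem.Set.ofList ys) (fun k => k) false).map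
            (fun k => (k, (ys.count k : Int))) := by
      exact ih ys.length (hn ▸ hlen) ys rfl
    -- name the sorted distinct keys of xs: m followed by the sorted distinct keys of ys
    set sYs := PySem.List.sorted (PySem.Set.ofList ys) (fun k => k) false with hsYs
    have hmemYs : ∀ a, a ∈ sYs ↔ (a ∈ xs ∧ a ≠ m) := by
      intro a
      rw [hsYs, PySem.List.mem_sorted, PySem.Set.mem_ofList, hys, List.mem_filter]
      simp
    have hsplit : PySem.List.sorted (PySem.Set.ofList xs) (fun k => k) false = m :: sYs := by
      apply PySem.List.sorted_eq_of_perm_of_pairwise_lt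
      · apply (List.perm_ext_iff_of_nodup ?_ (PySem.Set.nodup_ofList xs)).mpr
        · intro a
          rw [PySem.Set.mem_ofList, List.mem_cons, hmemYs a]
          constructor
          · rintro (rfl | ⟨h1, _⟩) <;> assumption
          · intro ha; by_cases h : a = m
            · exact Or.inl h
            · exact Or.inr ⟨ha, h⟩
        · refine List.Nodup.cons ?_ ?_
          · intro hc; exact ((hmemYs m).mp hc).2 rfl
          · rw [hsYs]
            have := PySem.Set.nodup_ofList ys
            have hp := PySem.List.sorted_perm (xs := PySem.Set.ofList ys)
              (key := fun k => k) (rev := false)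
            exact hp.nodup_iff.mpr this
      · refine List.pairwise_cons.mpr ⟨?_, ?_⟩
        · intro y hy
          have h2 := (hmemYs y).mp hy
          exact lt_of_le_of_ne (hmin' y h2.1) (Ne.symm h2.2)
        · have hle : sYs.Pairwise (fun a b => a ≤ b) := by
            simpa using PySem.List.sorted_pairwise
              (xs := PySem.Set.ofList ys) (key := fun k => k)
          have hnd : sYs.Pairwise (fun a b => a ≠ b) := by
            have hp := PySem.List.sorted_perm (xs := PySem.Set.ofList ys)
              (key := fun k => k) (rev := false)
            exact hp.nodup_iff.mpr (PySem.Set.nodup_ofList ys)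
          exact (hle.and hnd).imp (fun h => lt_of_le_of_ne h.1 h.2)
    rw [hrec, hsplit, List.map_cons]
    congr 1
    apply List.map_congr_left
    intro y hy
    have hyne : y ≠ m := ((hmemYs y).mp hy).2
    have : ys.count y = xs.count y := by
      rw [hys]; exact List.count_filter (by simp [hyne])
    rw [this]

theorem main_eq (member_list : List String) :
    deduplicated_sizeof member_list = deduplicated_sizeof_alt member_list := by
  by_cases hnil : member_list = []
  · subst hnil; rfl
  · have hsel := pvSelect_eq member_list
    have hterms : ∀ y ∈ PySem.List.sorted (PySem.Set.ofList member_list) (fun k => k) false,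
        ((if PySem.Dict.getD (PySem.Dict.counter member_list) y 0 = 1 then ""
          else PySem.Int.toStr (PySem.Dict.getD (PySem.Dict.counter member_list) y 0) ++ " * ")
          ++ ("sizeof(" ++ y ++ ")"))
        = ((if ((member_list.count y : Int)) > 1
            then PySem.Int.toStr ((member_list.count y : Int)) ++ " * " else "")
          ++ ("sizeof(" ++ y ++ ")")) := by
      intro y hy
      have hymem : y ∈ member_list := by
        rw [PySem.List.mem_sorted, PySem.Set.mem_ofList] at hy
        exact hy
      have hpos : 0 < member_list.count y := List.count_pos_iff.mpr hymem
      rw [PySem.Dict.getD_counter]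
      by_cases h1 : (member_list.count y : Int) = 1
      · rw [if_pos h1, if_neg (by omega)]
      · rw [if_neg h1, if_pos (by omega)]
    unfold deduplicated_sizeof deduplicated_sizeof_alt
    rw [if_neg hnil, if_neg hnil]
    simp only [hsel, List.map_map, Function.comp_def, PySem.Dict.keys_counter,
      List.length_map, PySem.List.length_sorted]
    rw [List.map_congr_left hterms]

-- ===== VERDICT (by name: the statement is the Claim_ definition above) =====
theorem deduplicated_sizeof_spec : Claim_equal_deduplicated_sizeof := by
  intro member_list _
  unfold Spec_deduplicated_sizeof
  exact main_eq member_list
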